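-- pv_equiv track=rewrite | github.com/Yatrogenesis/Obvivlorum | linux_executor.py | _is_dangerous_command
-- ===== SOURCE A (Python) =====
-- def _is_dangerous_command(command: str) -> bool:
--     """Check if a command is potentially dangerous."""
--     dangerous_patterns = [
--         "rm -rf /",
--         ":(){ :|:& };:",  # Fork bomb
--         "dd if=/dev/zero",
--         "mkfs.",
--         "fdisk",
--         "parted",
--         "> /dev/sd",
--         "chmod 777 /",
--         "chown -R root:root /",
--         "shutdown",
--         "reboot",
--         "halt",
--         "init 0",
--         "kill -9 -1",
--         "pkill -f .",
--         ":(){ :|: & };:",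
--         "curl | bash",
--         "wget | bash"
--     ]
--
--     command_lower = command.lower()
--     for pattern in dangerous_patterns:
--         if pattern.lower() in command_lower:
--             return True
--
--     return False
-- ===== SOURCE B (Python) =====
-- _DANGEROUS_PATTERNS = [
--     "rm -rf /",
--     ":(){ :|:& };:",
--     "dd if=/dev/zero",
--     "mkfs.",
--     "fdisk",
--     "parted",
--     "> /dev/sd",
--     "chmod 777 /",
--     "chown -r root:root /",
--     "shutdown",
--     "reboot",
--     "halt",
--     "init 0",
--     "kill -9 -1",
--     "pkill -f .",
--     ":(){ :|: & };:",
--     "curl | bash",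
--     "wget | bash",
-- ]
--
--
-- def _is_dangerous_command(command: str) -> bool:
--     """Check if a command is potentially dangerous (suffix-scan formulation)."""
--     s = command.lower()
--     for i in range(len(s)):
--         if any(s.startswith(p, i) for p in _DANGEROUS_PATTERNS):
--             return True
--     return False
-- ===== Notes on version B (the rewrite author's own statement) =====
-- stated objective: alternative
-- what changed: A runs one independent full substring scan per dangerous pattern; B makes a single left-to-right scan over the lowercased command, testing all patterns as prefixes at each position (suffix scan), with the pattern list pre-lowercased.
import Mathlib
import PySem

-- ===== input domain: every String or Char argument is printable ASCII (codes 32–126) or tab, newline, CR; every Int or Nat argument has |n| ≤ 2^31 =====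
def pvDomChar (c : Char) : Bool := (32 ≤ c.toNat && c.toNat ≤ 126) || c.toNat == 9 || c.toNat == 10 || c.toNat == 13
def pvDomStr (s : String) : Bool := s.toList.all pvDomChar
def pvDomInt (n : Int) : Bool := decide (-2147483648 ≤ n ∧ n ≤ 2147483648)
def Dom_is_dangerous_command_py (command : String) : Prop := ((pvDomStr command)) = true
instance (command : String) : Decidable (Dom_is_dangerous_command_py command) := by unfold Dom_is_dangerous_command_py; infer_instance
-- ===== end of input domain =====

-- B replaces A's per-pattern substring scans by a single left-to-right suffix scan that
-- tests every pattern as a prefix at each position (objective: alternative, same result).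

-- ===== PORT A =====
def dangerousPatternsA : List String :=
  ["rm -rf /", ":(){ :|:& };:", "dd if=/dev/zero", "mkfs.", "fdisk", "parted",
   "> /dev/sd", "chmod 777 /", "chown -R root:root /", "shutdown", "reboot", "halt",
   "init 0", "kill -9 -1", "pkill -f .", ":(){ :|: & };:", "curl | bash", "wget | bash"]

def is_dangerous_command_py (command : String) : Bool :=
  let commandLower := PySem.Str.lower command
  dangerousPatternsA.any (fun p => PySem.Str.isIn (PySem.Str.lower p) commandLower)

-- ===== PORT B =====
def dangerousPatternsB : List (List Char) :=
  ["rm -rf /".toList, ":(){ :|:& };:".toList, "dd if=/dev/zero".toList, "mkfs.".toList,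
   "fdisk".toList, "parted".toList, "> /dev/sd".toList, "chmod 777 /".toList,
   "chown -r root:root /".toList, "shutdown".toList, "reboot".toList, "halt".toList,
   "init 0".toList, "kill -9 -1".toList, "pkill -f .".toList, ":(){ :|: & };:".toList,
   "curl | bash".toList, "wget | bash".toList]

-- Source B's position loop ('for i in range(len(s)): any(s.startswith(p, i) …)'), as structural
-- recursion on the suffix s[i:]
def dangerousSuffixLoop : List Char → Bool
  | [] => false
  | c :: t =>
      if dangerousPatternsB.any (fun p => PySem.Chars.startswith (c :: t) p) then true
      else dangerousSuffixLoop t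

def is_dangerous_command_py_alt (command : String) : Bool :=
  dangerousSuffixLoop (PySem.Chars.lower command.toList)

-- ===== PRECONDITION & SPEC =====
def Spec_is_dangerous_command_py (command : String) (out : Bool) : Prop := out = is_dangerous_command_py_alt command
instance (command : String) (out : Bool) : Decidable (Spec_is_dangerous_command_py command out) := by unfold Spec_is_dangerous_command_py; infer_instance

-- ===== CLAIM (what is proved, stated in full; the proofs are below) =====
def Claim_equal_is_dangerous_command_py : Prop := ∀ (command : String), Dom_is_dangerous_command_py command → Spec_is_dangerous_command_py command (is_dangerous_command_py command)

-- ===== LEMMAS AND PROOFS =====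

-- B's suffix loop computes 'some pattern occurs as a substring'
theorem dangerousSuffixLoop_eq (s : List Char) :
    dangerousSuffixLoop s = dangerousPatternsB.any (fun p => PySem.Chars.isIn p s) := by
  induction s with
  | nil => decide
  | cons c t ih =>
    have hpt : ∀ p, PySem.Chars.isIn p (c :: t)
        = (PySem.Chars.startswith (c :: t) p || PySem.Chars.isIn p t) := by
      intro p
      apply Bool.eq_iff_iff.mpr
      simp [PySem.Chars.isIn_iff_infix, PySem.Chars.startswith_iff, List.infix_cons_iff]
    simp only [dangerousSuffixLoop, ih]
    by_cases hs : dangerousPatternsB.any (fun p => PySem.Chars.startswith (c :: t) p) = true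
    · rcases List.any_eq_true.mp hs with ⟨p, hp, hsp⟩
      rw [if_pos hs]
      exact (List.any_eq_true.2 ⟨p, hp, by rw [hpt p, hsp]; simp⟩).symm
    · have hs0 := hs
      rw [Bool.not_eq_true, List.any_eq_false] at hs
      rw [if_neg hs0]
      symm
      apply PySem.List.any_congr_mem
      intro p hp
      simp [hpt p, hs p hp]

-- the two literal pattern lists agree after lowering A's
theorem patterns_lower_eq :
    dangerousPatternsA.map (fun p => PySem.Chars.lower p.toList) = dangerousPatternsB := by
  decide

-- ===== VERDICT (by name: the statement is the Claim_ definition above) =====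
theorem is_dangerous_command_py_spec : Claim_equal_is_dangerous_command_py := by
  intro command _
  unfold Spec_is_dangerous_command_py is_dangerous_command_py is_dangerous_command_py_alt
  rw [dangerousSuffixLoop_eq, ← patterns_lower_eq, List.any_map]
  simp only [PySem.Str.isIn_eq, PySem.Str.toList_lower]
  rfl
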